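-- pv_equiv track=rewrite | github.com/huson-k/jsonExport | data_analysis_fwq_PUE.py | createKTName
-- ===== SOURCE A (Python) =====
-- def createKTName(ktnum: int):
--     Names = []
--     for i in range(ktnum):
--         i = i + 1
--         Names.append('KT-' + str(i) + '-空调总有功功率')
--         Names.append('KT-' + str(i) + '-压缩机1容量')
--         Names.append('KT-' + str(i) + '-压缩机2容量')
--         Names.append('KT-' + str(i) + '-冷凝风机1转速')
--         Names.append('KT-' + str(i) + '-冷凝风机2转速')
--         Names.append('KT-' + str(i) + '-风机1转速')
--         Names.append('KT-' + str(i) + '-风机2转速')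
--         Names.append('KT-' + str(i) + '-送风温度1')
--         Names.append('KT-' + str(i) + '-送风温度设定')
--         for hf_num in range(1, 5):
--             Names.append('KT-' + str(i) + '-回风温度' + str(hf_num))
--         Names.append('KT-' + str(i) + '-回风温度设定')
--     return Names
-- ===== SOURCE B (Python) =====
-- _KT_SUFFIXES = [
--     '空调总有功功率', '压缩机1容量', '压缩机2容量',
--     '冷凝风机1转速', '冷凝风机2转速', '风机1转速', '风机2转速',
--     '送风温度1', '送风温度设定',
--     '回风温度1', '回风温度2', '回风温度3', '回风温度4',
--     '回风温度设定',
-- ]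
--
-- def createKTName(ktnum: int):
--     return ['KT-' + str(i + 1) + '-' + s
--             for i in range(ktnum) for s in _KT_SUFFIXES]
-- ===== Notes on version B (the rewrite author's own statement) =====
-- stated objective: simpler
-- what changed: Replaces the 15 hard-coded append statements (with an inner range(1,5) loop) by a single comprehension driven by a module-level suffix table.
import Mathlib
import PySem

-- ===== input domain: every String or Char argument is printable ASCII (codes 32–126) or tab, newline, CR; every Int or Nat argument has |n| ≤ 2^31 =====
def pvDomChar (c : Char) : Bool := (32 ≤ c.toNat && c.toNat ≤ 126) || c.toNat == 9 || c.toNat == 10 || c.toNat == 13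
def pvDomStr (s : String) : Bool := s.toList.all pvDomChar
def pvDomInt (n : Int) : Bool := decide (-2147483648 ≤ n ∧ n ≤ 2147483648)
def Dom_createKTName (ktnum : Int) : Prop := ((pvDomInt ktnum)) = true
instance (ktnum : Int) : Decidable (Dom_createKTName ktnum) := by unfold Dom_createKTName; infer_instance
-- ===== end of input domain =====

-- B replaces A's 15 hard-coded appends (plus inner range(1,5) loop) by one comprehension over a suffix table; same output.

-- ===== PORT A =====
-- body of A's 'for i in range(ktnum)' loop, transliterated append by append
def ktLoopBody (names : List String) (i0 : Int) : List String :=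
  let i := i0 + 1
  let names := names ++ ["KT-" ++ PySem.Int.toStr i ++ "-空调总有功功率"]
  let names := names ++ ["KT-" ++ PySem.Int.toStr i ++ "-压缩机1容量"]
  let names := names ++ ["KT-" ++ PySem.Int.toStr i ++ "-压缩机2容量"]
  let names := names ++ ["KT-" ++ PySem.Int.toStr i ++ "-冷凝风机1转速"]
  let names := names ++ ["KT-" ++ PySem.Int.toStr i ++ "-冷凝风机2转速"]
  let names := names ++ ["KT-" ++ PySem.Int.toStr i ++ "-风机1转速"]
  let names := names ++ ["KT-" ++ PySem.Int.toStr i ++ "-风机2转速"]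
  let names := names ++ ["KT-" ++ PySem.Int.toStr i ++ "-送风温度1"]
  let names := names ++ ["KT-" ++ PySem.Int.toStr i ++ "-送风温度设定"]
  let names := (PySem.List.pyRange 1 5 1).foldl
    (fun ns hf_num => ns ++ ["KT-" ++ PySem.Int.toStr i ++ "-回风温度" ++ PySem.Int.toStr hf_num]) names
  names ++ ["KT-" ++ PySem.Int.toStr i ++ "-回风温度设定"]

def createKTName (ktnum : Int) : List String :=
  (PySem.List.pyRange 0 ktnum 1).foldl ktLoopBody []

-- ===== PORT B =====
def ktSuffixes : List String :=
  ["空调总有功功率", "压缩机1容量", "压缩机2容量",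
   "冷凝风机1转速", "冷凝风机2转速", "风机1转速", "风机2转速",
   "送风温度1", "送风温度设定",
   "回风温度1", "回风温度2", "回风温度3", "回风温度4",
   "回风温度设定"]

def createKTName_alt (ktnum : Int) : List String :=
  (PySem.List.pyRange 0 ktnum 1).flatMap
    (fun i => ktSuffixes.map (fun s => "KT-" ++ PySem.Int.toStr (i + 1) ++ "-" ++ s))

-- ===== PRECONDITION & SPEC =====
def Spec_createKTName (ktnum : Int) (out : List String) : Prop := out = createKTName_alt ktnum
instance (ktnum : Int) (out : List String) : Decidable (Spec_createKTName ktnum out) := by unfold Spec_createKTName; infer_instance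

-- ===== CLAIM (what is proved, stated in full; the proofs are below) =====
def Claim_equal_createKTName : Prop := ∀ (ktnum : Int), Dom_createKTName ktnum → Spec_createKTName ktnum (createKTName ktnum)

-- ===== LEMMAS AND PROOFS =====
theorem ktLoopBody_eq (names : List String) (i : Int) :
    ktLoopBody names i =
      names ++ ktSuffixes.map (fun s => "KT-" ++ PySem.Int.toStr (i + 1) ++ "-" ++ s) := by
  have h : PySem.List.pyRange 1 5 1 = [1, 2, 3, 4] := by decide
  simp [ktLoopBody, ktSuffixes, h, List.foldl, String.append_assoc]
  decide

theorem foldl_ktLoopBody (xs : List Int) (init : List String) :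
    xs.foldl ktLoopBody init =
      init ++ xs.flatMap (fun i => ktSuffixes.map (fun s => "KT-" ++ PySem.Int.toStr (i + 1) ++ "-" ++ s)) := by
  induction xs generalizing init with
  | nil => simp
  | cons x xs ih => simp [List.foldl, ih, ktLoopBody_eq, List.append_assoc]

-- ===== VERDICT (by name: the statement is the Claim_ definition above) =====
theorem createKTName_spec : Claim_equal_createKTName := by
  intro ktnum _
  unfold Spec_createKTName createKTName createKTName_alt
  simp [foldl_ktLoopBody]
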